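-- pv_equiv track=rewrite | github.com/ZachRN/advent-of-code | 2022/day08/one.py | checkEast
-- ===== SOURCE A (Python) =====
-- def checkEast(newList, myinput):
-- 	for row in range(1, len(myinput[0]) - 1):
-- 		newestMax = int(myinput[row][0])
-- 		for col in range(1, len(myinput) - 1):
-- 			if (int(myinput[row][col]) > newestMax):
-- 				newList[row][col] = 1
-- 				newestMax = int(myinput[row][col])
-- 	return (newList)
-- ===== SOURCE B (Python) =====
-- def checkEast(newList, myinput):
--     # Mutates newList in place (like the original) and returns it.
--     n = len(myinput)
--     for row in range(1, len(myinput[0]) - 1):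
--         vals = [int(s) for s in myinput[row][:n - 1]]
--         for col in range(1, n - 1):
--             if vals[col] > max(vals[:col]):
--                 newList[row][col] = 1
--     return newList
-- ===== Notes on version B (the rewrite author's own statement) =====
-- stated objective: alternative
-- what changed: A maintains an inline running-max variable updated as it scans each row; B is stateless: it parses the row's relevant prefix once into an int list and marks a cell whenever its value strictly exceeds max() of the slice of values before it, trading the O(n) running state for O(n^2) prefix-max queries. Pre_ excludes inputs where A raises, and (a slight narrowing) requires the accessed newList/myinput rows to have the full width len(myinput)-1 even when no assignment fires, since whether an assignment fires depends on run-time values and cannot be stated in closed form.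
import Mathlib
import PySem

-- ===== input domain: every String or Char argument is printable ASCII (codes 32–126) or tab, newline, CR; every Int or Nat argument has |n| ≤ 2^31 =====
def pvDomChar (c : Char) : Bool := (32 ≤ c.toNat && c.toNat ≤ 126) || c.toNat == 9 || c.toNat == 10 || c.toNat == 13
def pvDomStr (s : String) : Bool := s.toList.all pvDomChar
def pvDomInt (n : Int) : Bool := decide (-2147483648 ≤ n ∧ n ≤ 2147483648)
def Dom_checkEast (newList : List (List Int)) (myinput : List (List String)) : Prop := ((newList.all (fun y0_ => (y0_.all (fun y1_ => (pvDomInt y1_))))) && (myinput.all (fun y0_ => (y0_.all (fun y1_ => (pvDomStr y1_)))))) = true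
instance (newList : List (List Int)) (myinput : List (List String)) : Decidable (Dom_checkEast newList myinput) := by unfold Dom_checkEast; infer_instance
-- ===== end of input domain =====

-- B replaces A's inline running-max state with a stateless pass: parse the row prefix once,
-- then mark a cell iff its value exceeds max() of the values strictly before it (objective: alternative).
-- Both the Python A and Python B mutate newList in place; the equivalence proved here is about the return value.

-- int(xs[i]) where Python would raise (IndexError/ValueError) is modelled with default 0; Pre_ excludes those inputs.
def pyIntAt (xs : List String) (i : Int) : Int :=
  ((PySem.List.pyGet? xs i).bind PySem.Int.ofStr?).getD 0

-- newList[row][col] = v (indices here are always ≥ 1; out-of-range assignment — an IndexError in Python — is a no-op, excluded by Pre_)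
def setCell (m : List (List Int)) (row col : Int) (v : Int) : List (List Int) :=
  m.set row.toNat ((m.getD row.toNat []).set col.toNat v)

-- ===== PORT A =====
def checkEast (newList : List (List Int)) (myinput : List (List String)) : List (List Int) :=
  (PySem.List.pyRange 1 (((PySem.List.pyGetD myinput 0 []).length : Int) - 1) 1).foldl
    (fun acc row =>
      ((PySem.List.pyRange 1 ((myinput.length : Int) - 1) 1).foldl
        (fun (st : List (List Int) × Int) col =>
          if pyIntAt (PySem.List.pyGetD myinput row []) col > st.2 then
            (setCell st.1 row col 1, pyIntAt (PySem.List.pyGetD myinput row []) col)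
          else st)
        (acc, pyIntAt (PySem.List.pyGetD myinput row []) 0)).1)
    newList

-- ===== PORT B =====
def checkEast_alt (newList : List (List Int)) (myinput : List (List String)) : List (List Int) :=
  let n : Int := myinput.length
  (PySem.List.pyRange 1 (((PySem.List.pyGetD myinput 0 []).length : Int) - 1) 1).foldl
    (fun acc row =>
      let vals : List Int :=
        (PySem.List.slice (PySem.List.pyGetD myinput row []) none (some (n - 1))).map
          (fun s => (PySem.Int.ofStr? s).getD 0)
      (PySem.List.pyRange 1 (n - 1) 1).foldl
        (fun acc2 col =>
          if PySem.List.pyGetD vals col 0 >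
              (PySem.List.max? (PySem.List.slice vals none (some col)) (fun y => y)).getD 0 then
            setCell acc2 row col 1
          else acc2)
        acc)
    newList

-- ===== PRECONDITION & SPEC =====
-- Pre_ excludes the inputs on which A raises (empty myinput, missing/too-short rows, strings int()
-- rejects).  It slightly narrows A's domain: the row-width and newList-width requirements are imposed
-- even when no assignment would fire, since whether an assignment fires depends on run-time values.
def Pre_checkEast (newList : List (List Int)) (myinput : List (List String)) : Prop :=
  myinput ≠ [] ∧
  ∀ row ∈ PySem.List.pyRange 1 (((PySem.List.pyGetD myinput 0 []).length : Int) - 1) 1,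
    row.toNat < myinput.length ∧ row.toNat < newList.length ∧
    (myinput.length : Int) - 1 ≤ ((myinput.getD row.toNat []).length : Int) ∧
    (myinput.length : Int) - 1 ≤ ((newList.getD row.toNat []).length : Int) ∧
    myinput.getD row.toNat [] ≠ [] ∧
    (PySem.Int.ofStr? ((myinput.getD row.toNat []).getD 0 "")).isSome = true ∧
    ∀ col ∈ PySem.List.pyRange 1 ((myinput.length : Int) - 1) 1,
      (PySem.Int.ofStr? ((myinput.getD row.toNat []).getD col.toNat "")).isSome = true

instance (newList : List (List Int)) (myinput : List (List String)) : Decidable (Pre_checkEast newList myinput) := by unfold Pre_checkEast; infer_instance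

def pvWitness_checkEast : List (List Int) × List (List String) :=
  ([[0, 0, 0], [0, 0, 0], [0, 0, 0]],
   [["1", "2", "3"], ["2", "1", "3"], ["3", "2", "1"]])

def Spec_checkEast (newList : List (List Int)) (myinput : List (List String)) (out : List (List Int)) : Prop := out = checkEast_alt newList myinput
instance (newList : List (List Int)) (myinput : List (List String)) (out : List (List Int)) : Decidable (Spec_checkEast newList myinput out) := by unfold Spec_checkEast; infer_instance

-- ===== CLAIM (what is proved, stated in full; the proofs are below) =====
def Claim_equal_checkEast : Prop := ∀ (newList : List (List Int)) (myinput : List (List String)), Dom_checkEast newList myinput → Pre_checkEast newList myinput → Spec_checkEast newList myinput (checkEast newList myinput)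

-- ===== LEMMAS AND PROOFS =====

-- B's parsed prefix agrees (with default 0) with A's on-demand int(myinput[row][col]) at every index below n-1.
lemma vals_eq (r : List String) (n j : Int) (h0 : 0 ≤ j) (hj : j < n - 1) :
    PySem.List.pyGetD
      ((PySem.List.slice r none (some (n - 1))).map (fun s => (PySem.Int.ofStr? s).getD 0)) j 0
    = pyIntAt r j := by
  have hjk : j.toNat < (n - 1).toNat := by omega
  have hcast : j = (j.toNat : Int) := by omega
  rw [PySem.List.slice_to r (by omega), hcast, PySem.List.pyGetD_natCast]
  unfold pyIntAt
  rw [PySem.List.pyGet?_natCast]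
  simp only [List.getD_eq_getElem?_getD, List.getElem?_map, List.getElem?_take, hjk, if_pos]
  cases h : r[j.toNat]? <;> simp

-- prefix max of one more element
lemma max_take_succ (v : Int) (t : List Int) (j : Nat) (hj : j < t.length) :
    (PySem.List.max? ((v :: t).take (j + 2)) (fun y => y)).getD 0
    = max ((PySem.List.max? ((v :: t).take (j + 1)) (fun y => y)).getD 0) t[j] := by
  have h1 : (v :: t).take (j + 2) = v :: t.take (j + 1) := rfl
  have h2 : (v :: t).take (j + 1) = v :: t.take j := rfl
  have h3 : t.take (j + 1) = t.take j ++ [t[j]] := by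
    rw [List.take_add_one]; simp [List.getElem?_eq_getElem hj]
  rw [h1, h2, PySem.List.max?_id_cons, PySem.List.max?_id_cons, h3, List.foldl_append]
  simp

lemma loop_eq {β : Type} (g : Int → Int) (vals : List Int) (set : β → Int → β)
    (n : Int) (hlen : (vals.length : Int) = n - 1)
    (hg : ∀ j : Int, 0 ≤ j → j < n - 1 → PySem.List.pyGetD vals j 0 = g j)
    (m : Int) (h1 : 1 ≤ m) (hm : m ≤ n - 1) (acc : β) :
    (PySem.List.pyRange 1 m 1).foldl
        (fun st c => if g c > st.2 then (set st.1 c, g c) else st) (acc, g 0)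
    = ((PySem.List.pyRange 1 m 1).foldl
        (fun a c =>
          if PySem.List.pyGetD vals c 0 >
              (PySem.List.max? (PySem.List.slice vals none (some c)) (fun y => y)).getD 0 then
            set a c
          else a) acc,
       (PySem.List.max? (PySem.List.slice vals none (some m)) (fun y => y)).getD 0) := by
  obtain ⟨k, hk⟩ : ∃ k : Nat, m = 1 + (k : Int) := ⟨(m - 1).toNat, by omega⟩
  subst hk
  induction k generalizing acc with
  | zero =>
    simp only [Nat.cast_zero, add_zero]
    rw [PySem.List.pyRange_one_eq_nil (le_refl 1)]
    obtain ⟨v, t, hvt⟩ : ∃ v t, vals = v :: t := by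
      cases vals with
      | nil => simp at hlen; omega
      | cons v t => exact ⟨v, t, rfl⟩
    rw [PySem.List.slice_to vals (by omega)]
    have : ((1:Int)).toNat = 1 := rfl
    rw [this, hvt]
    have hmax : (PySem.List.max? ((v :: t).take 1) (fun y => y)).getD 0 = v := by
      simp [PySem.List.max?_id_cons]
    simp only [List.foldl_nil, hmax]
    have := hg 0 (le_refl 0) (by omega)
    rw [hvt] at this
    rw [PySem.List.pyGetD_zero_cons] at this
    rw [← this]
  | succ k ih =>
    have hstep : (1 : Int) + ((k+1 : Nat) : Int) = (1 + (k : Int)) + 1 := by push_cast; ring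
    rw [hstep, PySem.List.pyRange_one_succ_right (by omega : (1:Int) ≤ 1 + (k:Int)),
        List.foldl_append, List.foldl_append, ih acc (by omega) (by omega)]
    simp only [List.foldl_cons, List.foldl_nil]
    -- the current column
    set c : Int := 1 + (k : Int) with hc
    have hcn : c < n - 1 := by omega
    have hklen : k + 1 < vals.length := by omega
    obtain ⟨v, t, hvt⟩ : ∃ v t, vals = v :: t := by
      cases vals with
      | nil => simp at hlen; omega
      | cons v t => exact ⟨v, t, rfl⟩
    have htk : k < t.length := by rw [hvt] at hklen; simpa using hklen
    have hcnat : c.toNat = k + 1 := by omega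
    have hgc : g c = t[k] := by
      rw [← hg c (by omega) hcn]
      have : c = ((k+1 : Nat) : Int) := by omega
      rw [this, PySem.List.pyGetD_natCast, hvt]
      simp [List.getD_eq_getElem?_getD, List.getElem?_eq_getElem htk]
    have hMc : PySem.List.slice vals none (some c) = (v :: t).take (k + 1) := by
      rw [PySem.List.slice_to vals (by omega), hcnat, hvt]
    have hMc1 : PySem.List.slice vals none (some (c + 1)) = (v :: t).take (k + 2) := by
      rw [PySem.List.slice_to vals (by omega)]
      have : (c + 1).toNat = k + 2 := by omega
      rw [this, hvt]
    have hgci : PySem.List.pyGetD vals c 0 = g c := hg c (by omega) hcn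
    rw [hMc, hMc1, hgci, max_take_succ v t k htk, hgc]
    split_ifs with h
    · exact Prod.ext_iff.mpr ⟨rfl, by omega⟩
    · exact Prod.ext_iff.mpr ⟨rfl, by omega⟩

-- ===== VERDICT (by name: the statement is the Claim_ definition above) =====
theorem checkEast_spec : Claim_equal_checkEast := by
  intro newList myinput _dom pre
  unfold Spec_checkEast checkEast checkEast_alt
  simp only []
  apply PySem.List.foldl_congr_mem
  intro acc row hrow
  obtain ⟨-, hpre⟩ := pre
  obtain ⟨hm1, hm2, hlenr, hlennew, hne, hp0, hpcols⟩ := hpre row hrow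
  have hrow1 : 1 ≤ row := (PySem.List.mem_pyRange_one.mp hrow).1
  have hr : PySem.List.pyGetD myinput row [] = myinput.getD row.toNat [] := by
    have h : row = (row.toNat : Int) := by omega
    rw [h, PySem.List.pyGetD_natCast]
    simp only [List.getD_eq_getElem?_getD, Int.toNat_natCast]
  by_cases hn : 1 ≤ (myinput.length : Int) - 1
  · have hlen : (((PySem.List.slice (PySem.List.pyGetD myinput row []) none
        (some ((myinput.length : Int) - 1))).map
          (fun s => (PySem.Int.ofStr? s).getD 0)).length : Int)
        = (myinput.length : Int) - 1 := by
      rw [PySem.List.slice_to _ (by omega), List.length_map, List.length_take, hr]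
      omega
    have hg : ∀ j : Int, 0 ≤ j → j < (myinput.length : Int) - 1 →
        PySem.List.pyGetD
          ((PySem.List.slice (PySem.List.pyGetD myinput row []) none
            (some ((myinput.length : Int) - 1))).map
              (fun s => (PySem.Int.ofStr? s).getD 0)) j 0
        = pyIntAt (PySem.List.pyGetD myinput row []) j :=
      fun j h0 hj => vals_eq _ _ j h0 hj
    have key := loop_eq (fun c => pyIntAt (PySem.List.pyGetD myinput row []) c)
      ((PySem.List.slice (PySem.List.pyGetD myinput row []) none
        (some ((myinput.length : Int) - 1))).map (fun s => (PySem.Int.ofStr? s).getD 0))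
      (fun a c => setCell a row c 1) (myinput.length : Int) hlen hg
      ((myinput.length : Int) - 1) hn le_rfl acc
    rw [key]
  · rw [PySem.List.pyRange_one_eq_nil (by omega : (myinput.length : Int) - 1 ≤ 1)]
    simp
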